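-- pv_equiv track=rewrite | github.com/nihatgurbostan/nht | Pythonsorudeneme.py | check_for_number
-- ===== SOURCE A (Python) =====
-- def check_for_number(value):
--     list_value   = [int(i) for i in str(value)]
--     list_valuex2 = [int(i) for i in str(2*value)]
--     list_valuex3 = [int(i) for i in str(3*value)]
--     list_valuex4 = [int(i) for i in str(4*value)]
--     list_valuex5 = [int(i) for i in str(5*value)]
--     list_valuex6 = [int(i) for i in str(6*value)]
--
--     list_value.sort()
--     list_valuex2.sort()
--     list_valuex3.sort()
--     list_valuex4.sort()
--     list_valuex5.sort()
--     list_valuex6.sort()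
--
--     if (list_value == list_valuex2 and len(list_value) == len(list_valuex2)) and (list_value == list_valuex3 and len(list_value) == len(list_valuex3)) and (list_value == list_valuex4 and len(list_value) == len(list_valuex4)) and (list_value == list_valuex5 and len(list_value) == len(list_valuex5)) and (list_value == list_valuex6 and len(list_value) == len(list_valuex6)):
--         return True
--     else:
--         return False
-- ===== SOURCE B (Python) =====
-- def _signature(n):
--     # digit-frequency signature computed arithmetically (no string conversion)
--     n = abs(n)
--     counts = [0] * 10
--     while True:
--         counts[n % 10] += 1
--         n //= 10
--         if n == 0:
--             break
--     return counts
--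
--
-- def check_for_number(value):
--     counts = _signature(value)
--     return all(_signature(k * value) == counts for k in range(2, 7))
-- ===== Notes on version B (the rewrite author's own statement) =====
-- stated objective: simpler
-- what changed: Replaces the six string-convert/parse/sort lists and the long sorted-list comparison chain with a length-10 digit-count signature extracted arithmetically (divmod loop, no str/int round trip, no sorting), compared across the multiples 2..6.
import Mathlib
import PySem

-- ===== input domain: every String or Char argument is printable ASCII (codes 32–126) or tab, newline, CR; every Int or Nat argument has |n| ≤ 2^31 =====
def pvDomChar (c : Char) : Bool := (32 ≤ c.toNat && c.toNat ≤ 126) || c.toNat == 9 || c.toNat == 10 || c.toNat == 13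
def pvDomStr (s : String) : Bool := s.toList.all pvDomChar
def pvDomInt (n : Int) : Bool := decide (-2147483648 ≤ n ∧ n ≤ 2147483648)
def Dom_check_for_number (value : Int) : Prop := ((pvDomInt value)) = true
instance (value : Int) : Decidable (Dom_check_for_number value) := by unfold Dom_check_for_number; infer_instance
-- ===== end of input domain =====

-- B replaces the six str/int/sort passes by an arithmetic length-10 digit-count signature (simpler; return value only).


-- ===== PORT A =====
-- [int(i) for i in str(v)]; int(i) raises ValueError on a non-digit char (the '-' of a
-- negative v) — Pre_ excludes exactly those inputs, so the .getD 0 default is never claimed.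
def pvDigitsA (v : Int) : List Int :=
  (PySem.Int.toChars v).map (fun c => (PySem.Int.ofChars? [c]).getD 0)

def check_for_number (value : Int) : Bool :=
  -- each list is built then sorted in place; we sort at the binding (same value)
  let list_value   := PySem.List.sorted (pvDigitsA value) (fun x => x) false
  let list_valuex2 := PySem.List.sorted (pvDigitsA (2*value)) (fun x => x) false
  let list_valuex3 := PySem.List.sorted (pvDigitsA (3*value)) (fun x => x) false
  let list_valuex4 := PySem.List.sorted (pvDigitsA (4*value)) (fun x => x) false
  let list_valuex5 := PySem.List.sorted (pvDigitsA (5*value)) (fun x => x) false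
  let list_valuex6 := PySem.List.sorted (pvDigitsA (6*value)) (fun x => x) false
  if ((list_value == list_valuex2 && PySem.List.len list_value == PySem.List.len list_valuex2)
      && (list_value == list_valuex3 && PySem.List.len list_value == PySem.List.len list_valuex3))
      && (list_value == list_valuex4 && PySem.List.len list_value == PySem.List.len list_valuex4)
      && (list_value == list_valuex5 && PySem.List.len list_value == PySem.List.len list_valuex5)
      && (list_value == list_valuex6 && PySem.List.len list_value == PySem.List.len list_valuex6)
  then true else false

-- ===== PORT B =====
-- the do-while digit loop of _signature; index n % 10 is < 10 = counts.length, so plain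
-- list indexing/set is exact here
def pvSigAux (fuel : Nat) (n : Nat) (counts : List Int) : List Int :=
  match fuel with
  | 0 => counts.set (n % 10) (counts[n % 10]! + 1)
  | f + 1 =>
    let counts' := counts.set (n % 10) (counts[n % 10]! + 1)
    if n / 10 = 0 then counts' else pvSigAux f (n / 10) counts'

def pvSig (v : Int) : List Int := pvSigAux v.natAbs v.natAbs (List.replicate 10 0)

def check_for_number_alt (value : Int) : Bool :=
  let counts := pvSig value
  (PySem.List.pyRange 2 7 1).all (fun k => pvSig (k * value) == counts)

-- ===== PRECONDITION & SPEC =====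
-- Pre_ excludes negative value, where A raises ValueError (int('-')).
def Pre_check_for_number (value : Int) : Prop := 0 ≤ value
instance (value : Int) : Decidable (Pre_check_for_number value) := by unfold Pre_check_for_number; infer_instance
def pvWitness_check_for_number : Int := (142857)

def Spec_check_for_number (value : Int) (out : Bool) : Prop := out = check_for_number_alt value
instance (value : Int) (out : Bool) : Decidable (Spec_check_for_number value out) := by unfold Spec_check_for_number; infer_instance

-- ===== CLAIM (what is proved, stated in full; the proofs are below) =====
def Claim_equal_check_for_number : Prop := ∀ (value : Int), Dom_check_for_number value → Pre_check_for_number value → Spec_check_for_number value (check_for_number value)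

-- ===== LEMMAS AND PROOFS =====

def pvPyd (n : Nat) : List Nat := if n = 0 then [0] else Nat.digits 10 n

lemma pvPyd_base (n : Nat) (h : n / 10 = 0) : pvPyd n = [n % 10] := by
  unfold pvPyd
  rcases Nat.eq_zero_or_pos n with h0 | h0
  · simp [h0]
  · have hn : n < 10 := by omega
    rw [if_neg (by omega), Nat.digits_def' (by norm_num) h0, Nat.mod_eq_of_lt hn, h]
    simp

lemma pvPyd_cons (n : Nat) (h : n / 10 ≠ 0) : pvPyd n = n % 10 :: pvPyd (n / 10) := by
  unfold pvPyd
  have h0 : 0 < n := by omega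
  rw [if_neg (by omega), if_neg h, Nat.digits_def' (by norm_num) h0]

lemma pvPyd_lt (n d : Nat) (hd : d ∈ pvPyd n) : d < 10 := by
  unfold pvPyd at hd
  split at hd
  · simp at hd; omega
  · exact Nat.digits_lt_base (by norm_num) hd

lemma pv_toDigitsCore (f : Nat) : ∀ (n : Nat) (acc : List Char), n < f →
    Nat.toDigitsCore 10 f n acc = (pvPyd n).reverse.map Nat.digitChar ++ acc := by
  induction f with
  | zero => intro n acc h; omega
  | succ f ih =>
    intro n acc h
    rw [Nat.toDigitsCore]
    by_cases hdiv : n / 10 = 0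
    · rw [if_pos hdiv, pvPyd_base n hdiv]; simp
    · have h10 : 10 ≤ n := by
        by_contra hc
        exact hdiv (Nat.div_eq_of_lt (by omega))
      rw [if_neg hdiv, ih (n / 10) _ (by omega), pvPyd_cons n hdiv]
      simp

lemma pv_digits_eq (n : Nat) : Nat.toDigits 10 n = (pvPyd n).reverse.map Nat.digitChar := by
  rw [Nat.toDigits, pv_toDigitsCore (n+1) n [] (by omega)]; simp

lemma pv_digit_conv (d : Nat) (h : d < 10) :
    (PySem.Int.ofChars? [Nat.digitChar d]).getD 0 = (d : Int) := by
  interval_cases d <;> decide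

lemma pv_digitsA (n : Nat) : pvDigitsA (n : Int) = List.map (fun d : Nat => (d : Int)) (pvPyd n).reverse := by
  unfold pvDigitsA
  have ht : PySem.Int.toChars (n : Int) = Nat.toDigits 10 n := by simp [PySem.Int.toChars]
  rw [ht, pv_digits_eq, List.map_map]
  exact List.map_congr_left (fun d hd =>
    pv_digit_conv d (pvPyd_lt n d (List.mem_reverse.mp hd)))

def pvBump (cs : List Int) (d : Nat) : List Int := cs.set d (cs[d]! + 1)

lemma pvSigAux_eq_foldl (f : Nat) : ∀ (n : Nat) (counts : List Int), n ≤ f →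
    pvSigAux f n counts = (pvPyd n).foldl pvBump counts := by
  induction f with
  | zero =>
    intro n counts h
    have h0 : n = 0 := by omega
    subst h0
    simp [pvSigAux, pvPyd, pvBump]
  | succ f ih =>
    intro n counts h
    by_cases hdiv : n / 10 = 0
    · rw [pvPyd_base n hdiv]
      simp [pvSigAux, hdiv, pvBump]
    · have h10 : 10 ≤ n := by
        by_contra hc
        exact hdiv (Nat.div_eq_of_lt (by omega))
      rw [pvPyd_cons n hdiv]
      simp only [pvSigAux, if_neg hdiv, List.foldl_cons]
      exact ih (n / 10) _ (by omega)

lemma pv_foldl_len (l : List Nat) : ∀ (counts : List Int),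
    (l.foldl pvBump counts).length = counts.length := by
  induction l with
  | nil => intro counts; rfl
  | cons d t ih => intro counts; simp [ih, pvBump]

lemma pv_foldl_count (l : List Nat) (hl : ∀ d ∈ l, d < 10) : ∀ (counts : List Int), counts.length = 10 →
    ∀ j : Nat, j < 10 → (l.foldl pvBump counts)[j]! = counts[j]! + (l.count j : Int) := by
  induction l with
  | nil => intro counts hlen j hj; simp
  | cons d t ih =>
    intro counts hlen j hj
    have hd : d < 10 := hl d List.mem_cons_self
    have hjl : j < counts.length := by omega
    rw [List.foldl_cons, ih (fun x hx => hl x (List.mem_cons_of_mem d hx)) (pvBump counts d)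
      (by simp [pvBump, hlen]) j hj]
    have hstep : (pvBump counts d)[j]! = if d = j then counts[d]! + 1 else counts[j]! := by
      rw [getElem!_pos (pvBump counts d) j (by simp [pvBump]; omega)]
      simp only [pvBump, List.getElem_set]
      split
      · rfl
      · exact (getElem!_pos counts j hjl).symm
    by_cases hjd : j = d
    · subst hjd
      rw [hstep, if_pos rfl, List.count_cons_self]
      push_cast; ring
    · rw [hstep, if_neg (fun h => hjd h.symm), List.count_cons_of_ne (fun h => hjd h.symm)]

lemma pv_rev_perm_iff (l₁ l₂ : List Nat) : l₁.reverse.Perm l₂.reverse ↔ l₁.Perm l₂ := by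
  constructor
  · intro h; exact (l₁.reverse_perm.symm.trans h).trans l₂.reverse_perm
  · intro h; exact (l₁.reverse_perm.trans h).trans l₂.reverse_perm.symm

lemma pv_sig_eq_foldl (m : Nat) : pvSig (m : Int) = (pvPyd m).foldl pvBump (List.replicate 10 0) := by
  unfold pvSig
  rw [Int.natAbs_natCast]
  exact pvSigAux_eq_foldl m m _ le_rfl

lemma pv_sig_iff (m n : Nat) : (pvSig (m : Int) = pvSig (n : Int)) ↔ (pvPyd m).Perm (pvPyd n) := by
  rw [pv_sig_eq_foldl, pv_sig_eq_foldl]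
  constructor
  · intro h
    rw [List.perm_iff_count]
    intro x
    by_cases hx : x < 10
    · have h1 := pv_foldl_count (pvPyd m) (pvPyd_lt m) (List.replicate 10 0) (by simp) x hx
      have h2 := pv_foldl_count (pvPyd n) (pvPyd_lt n) (List.replicate 10 0) (by simp) x hx
      rw [h] at h1
      rw [h1] at h2
      have := add_left_cancel h2
      exact_mod_cast this
    · rw [List.count_eq_zero.mpr (fun hc => hx (pvPyd_lt m x hc)),
          List.count_eq_zero.mpr (fun hc => hx (pvPyd_lt n x hc))]
  · intro h
    apply List.ext_getElem (by rw [pv_foldl_len, pv_foldl_len])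
    intro i h1 h2
    have hi : i < 10 := by
      rw [pv_foldl_len (pvPyd m) (List.replicate 10 0)] at h1
      simpa using h1
    rw [← getElem!_pos _ i h1, ← getElem!_pos _ i h2,
        pv_foldl_count (pvPyd m) (pvPyd_lt m) (List.replicate 10 0) (by simp) i hi,
        pv_foldl_count (pvPyd n) (pvPyd_lt n) (List.replicate 10 0) (by simp) i hi,
        h.count_eq]

lemma pv_sorted_iff (m n : Nat) :
    (PySem.List.sorted (pvDigitsA (m : Int)) (fun x => x) false
      = PySem.List.sorted (pvDigitsA (n : Int)) (fun x => x) false) ↔ (pvPyd m).Perm (pvPyd n) := by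
  rw [pv_digitsA, pv_digitsA, PySem.List.sorted_id_eq_sorted_id_iff_perm,
      List.map_perm_map_iff (fun a b hab => by exact_mod_cast hab), pv_rev_perm_iff]

lemma pv_conj (a b : Nat) :
    ((PySem.List.sorted (pvDigitsA (a : Int)) (fun x => x) false
        == PySem.List.sorted (pvDigitsA (b : Int)) (fun x => x) false)
      && (PySem.List.len (PySem.List.sorted (pvDigitsA (a : Int)) (fun x => x) false)
        == PySem.List.len (PySem.List.sorted (pvDigitsA (b : Int)) (fun x => x) false)))
    = (pvSig (b : Int) == pvSig (a : Int)) := by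
  by_cases h : PySem.List.sorted (pvDigitsA (a : Int)) (fun x => x) false
      = PySem.List.sorted (pvDigitsA (b : Int)) (fun x => x) false
  · have hsig : pvSig (b : Int) = pvSig (a : Int) :=
      (pv_sig_iff b a).mpr ((pv_sorted_iff a b).mp h).symm
    simp [h, hsig]
  · have hsig : pvSig (b : Int) ≠ pvSig (a : Int) :=
      fun hc => h ((pv_sorted_iff a b).mpr ((pv_sig_iff b a).mp hc).symm)
    rw [beq_eq_false_iff_ne.mpr h, beq_eq_false_iff_ne.mpr hsig, Bool.false_and]

-- ===== VERDICT (by name: the statement is the Claim_ definition above) =====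
theorem check_for_number_spec : Claim_equal_check_for_number := by
  intro value _ hpre
  unfold Spec_check_for_number
  obtain ⟨m, rfl⟩ : ∃ m : Nat, value = (m : Int) :=
    ⟨value.toNat, (Int.toNat_of_nonneg hpre).symm⟩
  have h2 : (2 : Int) * (m : Int) = ((2 * m : Nat) : Int) := by push_cast; ring
  have h3 : (3 : Int) * (m : Int) = ((3 * m : Nat) : Int) := by push_cast; ring
  have h4 : (4 : Int) * (m : Int) = ((4 * m : Nat) : Int) := by push_cast; ring
  have h5 : (5 : Int) * (m : Int) = ((5 * m : Nat) : Int) := by push_cast; ring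
  have h6 : (6 : Int) * (m : Int) = ((6 * m : Nat) : Int) := by push_cast; ring
  have hr : PySem.List.pyRange 2 7 1 = [2, 3, 4, 5, 6] := by decide
  simp only [check_for_number, check_for_number_alt, hr, List.all_cons, List.all_nil,
    h2, h3, h4, h5, h6, pv_conj]
  cases pvSig ((2 * m : Nat) : Int) == pvSig (m : Int) <;>
    cases pvSig ((3 * m : Nat) : Int) == pvSig (m : Int) <;>
    cases pvSig ((4 * m : Nat) : Int) == pvSig (m : Int) <;>
    cases pvSig ((5 * m : Nat) : Int) == pvSig (m : Int) <;>
    cases pvSig ((6 * m : Nat) : Int) == pvSig (m : Int) <;> simp
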